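-- pv_equiv track=rewrite | github.com/himent12/FlashGenie | flashgenie/core/content_recommendation/generators.py | _find_simple_related_topics
-- ===== SOURCE A (Python) =====
-- from typing import List, Set, Dict, Any
--
-- def _find_simple_related_topics(topic: str, all_topics: Set[str]) -> Set[str]:
--     """Find topics that might be related to the given topic."""
--     related = set()
--
--     # Simple heuristic: topics with similar words
--     topic_words = set(topic.lower().split())
--
--     for other_topic in all_topics:
--         if other_topic != topic:
--             other_words = set(other_topic.lower().split())
--             # If topics share words, they might be related
--             if topic_words & other_words:
--                 related.add(other_topic)
--
--     return related
-- ===== SOURCE B (Python) =====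
-- def _find_simple_related_topics(topic, all_topics):
--     """Find topics that might be related to the given topic (inverted-index version)."""
--     order = list(all_topics)
--     pairs = [(w, i) for i, t in enumerate(order) for w in t.lower().split()]
--     index = {}
--     for w, i in pairs:
--         index.setdefault(w, []).append(i)
--     hit = set()
--     for w in topic.lower().split():
--         hit.update(index.get(w, []))
--     return {order[i] for i in sorted(hit) if order[i] != topic}
-- ===== Notes on version B (the rewrite author's own statement) =====
-- stated objective: alternative
-- what changed: Instead of intersecting the query's word set with each topic's word set in turn, B builds an inverted word-to-topic-index map in one pass, unions the index hits of the query's words, and emits the hit topics (minus the topic itself) in list order.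
import Mathlib
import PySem

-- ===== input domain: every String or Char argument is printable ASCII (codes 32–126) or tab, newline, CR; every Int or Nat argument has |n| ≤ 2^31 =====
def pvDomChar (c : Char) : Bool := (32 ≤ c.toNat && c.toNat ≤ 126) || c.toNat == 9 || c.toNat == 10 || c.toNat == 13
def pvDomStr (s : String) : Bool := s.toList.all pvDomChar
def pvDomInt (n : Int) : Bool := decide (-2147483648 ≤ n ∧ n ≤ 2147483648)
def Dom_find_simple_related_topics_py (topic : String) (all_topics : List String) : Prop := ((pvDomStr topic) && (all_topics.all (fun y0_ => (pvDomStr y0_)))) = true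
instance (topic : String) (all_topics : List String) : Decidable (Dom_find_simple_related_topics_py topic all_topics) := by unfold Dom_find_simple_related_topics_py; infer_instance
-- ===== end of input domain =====

-- B replaces A's topic-by-topic word-set intersections with an inverted word→indices index,
-- a union of index hits and one index-ordered emission pass (objective: alternative; return-value equivalence).

-- ===== PORT A =====
def find_simple_related_topics_py (topic : String) (all_topics : List String) : List String :=
  let topic_words : PySem.Set String := PySem.Set.ofList (PySem.Str.split₀ (PySem.Str.lower topic))
  all_topics.foldl (fun related other_topic =>
    if other_topic != topic then
      let other_words : PySem.Set String := PySem.Set.ofList (PySem.Str.split₀ (PySem.Str.lower other_topic))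
      if !(PySem.Set.inter topic_words other_words).isEmpty then
        PySem.Set.add related other_topic
      else related
    else related) PySem.Set.empty

-- ===== PORT B =====
def find_simple_related_topics_py_alt (topic : String) (all_topics : List String) : List String :=
  let order := all_topics
  let pairs : List (String × Int) :=
    (PySem.List.enumerate order).flatMap
      (fun it => (PySem.Str.split₀ (PySem.Str.lower it.2)).map (fun w => (w, it.1)))
  let index : PySem.Dict String (List Int) :=
    pairs.foldl (fun d p => d.modify p.1 [] (fun l => l ++ [p.2])) PySem.Dict.empty
  let hit : PySem.Set Int :=
    (PySem.Str.split₀ (PySem.Str.lower topic)).foldl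
      (fun s w => PySem.Set.update s (index.getD w [])) PySem.Set.empty
  (PySem.List.sorted hit (fun i => i)).foldl
    (fun res i =>
      let t := PySem.List.pyGetD order i ""
      if t != topic then PySem.Set.add res t else res) PySem.Set.empty

-- ===== PRECONDITION & SPEC =====
def Spec_find_simple_related_topics_py (topic : String) (all_topics : List String) (out : List String) : Prop := out = find_simple_related_topics_py_alt topic all_topics
instance (topic : String) (all_topics : List String) (out : List String) : Decidable (Spec_find_simple_related_topics_py topic all_topics out) := by unfold Spec_find_simple_related_topics_py; infer_instance

-- ===== CLAIM (what is proved, stated in full; the proofs are below) =====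
def Claim_equal_find_simple_related_topics_py : Prop := ∀ (topic : String) (all_topics : List String), Dom_find_simple_related_topics_py topic all_topics → Spec_find_simple_related_topics_py topic all_topics (find_simple_related_topics_py topic all_topics)

-- ===== LEMMAS AND PROOFS =====

def pvWords (s : String) : List String := PySem.Str.split₀ (PySem.Str.lower s)

def pvShares (topic t : String) : Bool := (pvWords topic).any (fun w => (pvWords t).contains w)

def pvCond (topic t : String) : Bool := (t != topic) && pvShares topic t

def pvPairs (ats : List String) : List (String × Int) :=
  (PySem.List.enumerate ats).flatMap (fun it => (pvWords it.2).map (fun w => (w, it.1)))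

def pvR (ats : List String) : List Int := PySem.List.pyRange 0 (PySem.List.len ats)

def pvTarget (topic : String) (ats : List String) : List Int :=
  (pvR ats).filter (fun i => pvShares topic (PySem.List.pyGetD ats i ""))

-- the word-set intersection test of A is the "some query word occurs" test
lemma pvShares_eq (topic t : String) :
    (!(PySem.Set.inter (PySem.Set.ofList (pvWords topic)) (PySem.Set.ofList (pvWords t))).isEmpty)
      = pvShares topic t := by
  rw [Bool.eq_iff_iff]
  simp [pvShares, List.any_eq_true,
    List.eq_nil_iff_forall_not_mem, PySem.Set.mem_inter, PySem.Set.mem_ofList]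

-- a conditional Set.add loop is a Set.add loop over the filtered mapped list
lemma foldl_ite_add {α β : Type} [BEq α] (f : β → α) (p : α → Bool) :
    ∀ (l : List β) (s : PySem.Set α),
      l.foldl (fun s b => if p (f b) then PySem.Set.add s (f b) else s) s
        = ((l.map f).filter p).foldl PySem.Set.add s := by
  intro l
  induction l with
  | nil => intro s; rfl
  | cons b l ih =>
    intro s
    by_cases hp : p (f b) = true <;> simp [hp, ih]

lemma A_char (topic : String) (ats : List String) :
    find_simple_related_topics_py topic ats
      = (ats.filter (pvCond topic)).foldl PySem.Set.add PySem.Set.empty := by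
  have hfun : (fun (related : PySem.Set String) other_topic =>
      if other_topic != topic then
        if !(PySem.Set.inter (PySem.Set.ofList (PySem.Str.split₀ (PySem.Str.lower topic)))
              (PySem.Set.ofList (PySem.Str.split₀ (PySem.Str.lower other_topic)))).isEmpty then
          PySem.Set.add related other_topic
        else related
      else related)
      = (fun (s : PySem.Set String) t => if pvCond topic t = true then PySem.Set.add s ((fun x => x) t) else s) := by
    funext s t
    by_cases h : (t != topic) = true
    · simp only [h, if_true, pvCond, Bool.true_and]
      rw [show PySem.Str.split₀ (PySem.Str.lower topic) = pvWords topic from rfl,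
          show PySem.Str.split₀ (PySem.Str.lower t) = pvWords t from rfl, pvShares_eq]
    · simp [pvCond, h]
  show ats.foldl _ _ = _
  rw [hfun, foldl_ite_add (fun x => x) (pvCond topic) ats PySem.Set.empty, List.map_id']

-- membership in the inverted-index pair list
lemma mem_pvPairs (ats : List String) (w : String) (i : Int) :
    (w, i) ∈ pvPairs ats ↔ i ∈ pvR ats ∧ w ∈ pvWords (PySem.List.pyGetD ats i "") := by
  unfold pvPairs pvR
  rw [PySem.List.enumerate_eq_map_pyRange ats ""]
  simp only [List.mem_flatMap, List.mem_map, Prod.mk.injEq]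
  constructor
  · rintro ⟨j, ⟨k, hk, rfl⟩, w', hw', hww, hij⟩
    subst hij; subst hww; exact ⟨hk, hw'⟩
  · rintro ⟨hi, hw⟩
    exact ⟨(i, PySem.List.pyGetD ats i ""), ⟨i, hi, rfl⟩, w, hw, rfl, rfl⟩

-- membership in the union-of-hits loop
lemma mem_hit_aux (P : List (String × Int)) :
    ∀ (ws : List String) (s : PySem.Set Int) (i : Int),
      i ∈ ws.foldl (fun s w => PySem.Set.update s ((P.filter (fun p => p.1 == w)).map (fun x => x.2))) s
        ↔ i ∈ s ∨ ∃ w ∈ ws, (w, i) ∈ P := by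
  intro ws
  induction ws with
  | nil => intro s i; simp
  | cons w ws ih =>
    intro s i
    rw [List.foldl_cons, ih]
    rw [PySem.Set.mem_update]
    constructor
    · rintro (h | h)
      · rcases h with h | h
        · exact Or.inl h
        · rcases List.mem_map.mp h with ⟨p, hp, rfl⟩
          rcases List.mem_filter.mp hp with ⟨hpP, hpw⟩
          refine Or.inr ⟨w, by simp, ?_⟩
          have : p.1 = w := by simpa using hpw
          rw [← this]; exact hpP
      · rcases h with ⟨w', hw', hP⟩
        exact Or.inr ⟨w', by simp [hw'], hP⟩
    · rintro (h | ⟨w', hw', hP⟩)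
      · exact Or.inl (Or.inl h)
      · rcases List.mem_cons.mp hw' with rfl | hw'
        · refine Or.inl (Or.inr ?_)
          exact List.mem_map.mpr ⟨(w', i), List.mem_filter.mpr ⟨hP, by simp⟩, rfl⟩
        · exact Or.inr ⟨w', hw', hP⟩

lemma nodup_hit_aux (P : List (String × Int)) :
    ∀ (ws : List String) (s : PySem.Set Int), s.Nodup →
      (ws.foldl (fun s w => PySem.Set.update s ((P.filter (fun p => p.1 == w)).map (fun x => x.2))) s).Nodup := by
  intro ws
  induction ws with
  | nil => intro s h; exact h
  | cons w ws ih =>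
    intro s h
    exact ih _ (PySem.Set.nodup_update _ _ h)

lemma pairwise_lt_pvR (ats : List String) : (pvR ats).Pairwise (· < ·) := by
  unfold pvR
  rw [show PySem.List.len ats = ((ats.length : Nat) : Int) from rfl, PySem.List.pyRange_zero_natCast]
  exact List.pairwise_map.mpr (List.pairwise_lt_range.imp (by intro a b h; exact_mod_cast h))

lemma pairwise_lt_pvTarget (topic : String) (ats : List String) :
    (pvTarget topic ats).Pairwise (· < ·) :=
  (pairwise_lt_pvR ats).filter _

lemma map_pvR_getD (ats : List String) :
    (pvR ats).map (fun i => PySem.List.pyGetD ats i "") = ats :=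
  PySem.List.map_pyGetD_pyRange_zero ats ""

set_option maxHeartbeats 1000000 in
lemma alt_unfold (topic : String) (ats : List String) :
    find_simple_related_topics_py_alt topic ats
      = (PySem.List.sorted
          ((PySem.Str.split₀ (PySem.Str.lower topic)).foldl
            (fun s w => PySem.Set.update s
              (((pvPairs ats).foldl (fun d p => d.modify p.1 [] (fun l => l ++ [p.2])) PySem.Dict.empty).getD w []))
            PySem.Set.empty) (fun i => i)).foldl
          (fun res i =>
            let t := PySem.List.pyGetD ats i ""
            if t != topic then PySem.Set.add res t else res) PySem.Set.empty := rfl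

lemma B_char (topic : String) (ats : List String) :
    find_simple_related_topics_py_alt topic ats
      = (((pvTarget topic ats).map (fun i => PySem.List.pyGetD ats i "")).filter (fun t => t != topic)).foldl
          PySem.Set.add PySem.Set.empty := by
  rw [alt_unfold]
  have hidx : ∀ w : String,
      ((pvPairs ats).foldl (fun d p => d.modify p.1 [] (fun l => l ++ [p.2])) PySem.Dict.empty).getD w []
        = ((pvPairs ats).filter (fun p => p.1 == w)).map (fun x => x.2) := by
    intro w
    rw [PySem.Dict.getD_foldl_modify_append, PySem.Dict.getD_empty]
    rfl
  simp only [hidx]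
  have hsorted :
      PySem.List.sorted
        ((PySem.Str.split₀ (PySem.Str.lower topic)).foldl
          (fun s w => PySem.Set.update s (((pvPairs ats).filter (fun p => p.1 == w)).map (fun x => x.2)))
          PySem.Set.empty) (fun i => i)
        = pvTarget topic ats := by
    apply PySem.List.sorted_eq_of_perm_of_pairwise_lt
    · rw [List.perm_ext_iff_of_nodup (pairwise_lt_pvTarget topic ats).nodup
        (nodup_hit_aux _ _ PySem.Set.empty List.nodup_nil)]
      intro i
      rw [mem_hit_aux]
      unfold pvTarget
      rw [List.mem_filter]
      simp only [PySem.Set.empty, List.not_mem_nil, false_or]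
      constructor
      · rintro ⟨hiR, hsh⟩
        unfold pvShares at hsh
        rcases List.any_eq_true.mp hsh with ⟨w, hw, hc⟩
        exact ⟨w, by simpa [pvWords] using hw, (mem_pvPairs ats w i).mpr ⟨hiR, by simpa using hc⟩⟩
      · rintro ⟨w, hw, hP⟩
        rcases (mem_pvPairs ats w i).mp hP with ⟨hiR, hwi⟩
        refine ⟨hiR, ?_⟩
        unfold pvShares
        rw [List.any_eq_true]
        exact ⟨w, by simpa [pvWords] using hw, by simpa using hwi⟩
    · exact pairwise_lt_pvTarget topic ats
  rw [hsorted]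
  exact foldl_ite_add (fun i => PySem.List.pyGetD ats i "") (fun t => t != topic)
    (pvTarget topic ats) PySem.Set.empty

lemma filter_map_filter {α β : Type} (f : α → β) (p q : β → Bool) :
    ∀ l : List α, ((l.filter (fun a => q (f a))).map f).filter p
      = (l.map f).filter (fun b => q b && p b) := by
  intro l
  induction l with
  | nil => rfl
  | cons a l ih =>
    by_cases h1 : q (f a) = true <;> by_cases h2 : p (f a) = true <;> simp [h1, h2, ih]

lemma filters_agree (topic : String) (ats : List String) :
    ((pvTarget topic ats).map (fun i => PySem.List.pyGetD ats i "")).filter (fun t => t != topic)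
      = ats.filter (pvCond topic) := by
  unfold pvTarget
  calc ((((pvR ats).filter (fun i => pvShares topic (PySem.List.pyGetD ats i ""))).map
          (fun i => PySem.List.pyGetD ats i "")).filter (fun t => t != topic))
      = ((pvR ats).map (fun i => PySem.List.pyGetD ats i "")).filter
          (fun b => (fun t => pvShares topic t) b && (fun t => t != topic) b) :=
        filter_map_filter (fun i => PySem.List.pyGetD ats i "") (fun t => t != topic)
          (fun t => pvShares topic t) (pvR ats)
    _ = ats.filter (fun b => pvShares topic b && (b != topic)) := by rw [map_pvR_getD]
    _ = ats.filter (pvCond topic) := List.filter_congr (fun t _ => Bool.and_comm _ _)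

-- ===== VERDICT (by name: the statement is the Claim_ definition above) =====
theorem find_simple_related_topics_py_spec : Claim_equal_find_simple_related_topics_py := by
  intro topic ats _
  unfold Spec_find_simple_related_topics_py
  rw [A_char, B_char, filters_agree]
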